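-- pv_equiv track=rewrite | github.com/txytju/checkio | adfgvx-cipher.py | encode
-- ===== SOURCE A (Python) =====
-- from math import ceil
-- from itertools import zip_longest
--
-- def encode(message, secret_alphabet, keyword):
--
--   # 翻译表
--   alphabat = [["d","h","x","m","u","4"],
--               ["p","3","j","6","a","o"],
--               ["i","b","z","v","9","w"],
--               ["1","n","7","0","q","k"],
--               ["f","s","l","y","c","8"],
--               ["t","r","5","e","2","g"]]
--
--   item = "ADFGVX"
--   dict_translate = {}
--
--   for i in range(len(alphabat)):
--     for j in range(len(alphabat)):
--       dict_translate[alphabat[i][j]] = item[i]+item[j]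
--
--   # 原始字符串处理
--   message = "".join([i for i in message.lower() if i.isalpha() or i.isdigit()])
--   message = "".join([dict_translate[i] for i in message])
--
--   # 将原始字符串切分，转置
--   n = len(keyword)
--   m = ceil(len(message)/len(keyword))
--   l = []
--
--   for i in range(m):
--     l.append(message[i*n:(i+1)*n])
--
--   l = ["".join(i) for i in zip_longest(*l, fillvalue="")]
--
--   # 按照字母表的顺序重新排列l中的字符串
--   dict = {}
--
--   for i in range(n):
--     dict[keyword[i]] = l[i]
--
--   l = sorted(dict.items(), key=lambda x:x[0])
--
--   return "".join([i[1] for i in l])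
-- ===== SOURCE B (Python) =====
-- # B: same ADFGVX encode, but the translation table comes from a flat 36-char string
-- # (divmod indexing) and the columnar transposition is read off directly with strided
-- # slices msg[j::n] instead of building rows and transposing them with zip_longest.
-- def encode(message, secret_alphabet, keyword):
--     item = "ADFGVX"
--     flat = "dhxmu4p3j6aoibzv9w1n70qkfslyc8tr5e2g"
--     table = {c: item[i // 6] + item[i % 6] for i, c in enumerate(flat)}
--     msg = "".join(table[c] for c in message.lower() if c.isalpha() or c.isdigit())
--     n = len(keyword)
--     cols = {keyword[j]: msg[j::n] for j in range(n)}
--     return "".join(cols[k] for k in sorted(cols))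
-- ===== Notes on version B (the rewrite author's own statement) =====
-- stated objective: idiomatic
-- what changed: The translation table is built from a flat 36-char string with divmod indexing instead of nested 6x6 loops, and the columnar transposition reads each column directly as a strided slice msg[j::n] instead of building ceil(len/n) rows and transposing them with zip_longest.
import Mathlib
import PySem

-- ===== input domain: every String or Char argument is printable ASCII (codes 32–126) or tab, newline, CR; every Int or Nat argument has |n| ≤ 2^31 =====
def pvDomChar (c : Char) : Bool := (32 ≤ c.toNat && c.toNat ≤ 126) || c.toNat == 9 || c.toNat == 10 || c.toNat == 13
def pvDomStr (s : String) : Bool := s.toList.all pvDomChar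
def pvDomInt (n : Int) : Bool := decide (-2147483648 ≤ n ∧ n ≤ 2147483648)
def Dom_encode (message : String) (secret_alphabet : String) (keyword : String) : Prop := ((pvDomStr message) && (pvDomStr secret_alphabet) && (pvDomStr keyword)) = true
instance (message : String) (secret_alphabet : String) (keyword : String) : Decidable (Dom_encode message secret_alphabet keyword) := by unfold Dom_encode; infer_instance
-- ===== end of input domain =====

-- B builds the ADFGVX translation table from a flat 36-char string with divmod indexing and
-- reads each transposition column directly as a strided slice msg[j::n], instead of A's nested
-- 6x6 table loops and row-building + zip_longest transpose (objective: idiomatic).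

-- ===== PORT A =====
-- the 6x6 substitution square and the header letters, as in A
def pvAlphabat : List (List Char) :=
  [['d','h','x','m','u','4'], ['p','3','j','6','a','o'], ['i','b','z','v','9','w'],
   ['1','n','7','0','q','k'], ['f','s','l','y','c','8'], ['t','r','5','e','2','g']]

def pvItemA : List Char := ['A','D','F','G','V','X']

-- dict_translate built by A's nested 'for i in range(6): for j in range(6)' loops;
-- item[i]+item[j] is the two-character string [item[i], item[j]]
def pvTableA : PySem.Dict Char (List Char) :=
  (PySem.List.pyRange 0 (pvAlphabat.length : Int) 1).foldl (fun d i =>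
    (PySem.List.pyRange 0 (pvAlphabat.length : Int) 1).foldl (fun d j =>
      d.insert (PySem.List.pyGetD (PySem.List.pyGetD pvAlphabat i []) j ' ')
        [PySem.List.pyGetD pvItemA i ' ', PySem.List.pyGetD pvItemA j ' ']) d)
    PySem.Dict.empty

-- the two joins: filter the lowered message, then translate each kept character.
-- dict_translate[i] cannot raise KeyError: kept characters are ASCII [a-z0-9], all table keys.
def pvMsgTA (message : String) : List Char :=
  (((PySem.Chars.lower message.toList).filter
      (fun c => PySem.Chars.isalpha c || PySem.Chars.isdigit c)).map
    (fun c => pvTableA.getD c [])).flatten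

-- 'for i in range(m): l.append(message[i*n:(i+1)*n])'; m = ceil(len/n) is exact Nat arithmetic
-- for n ≥ 1 (Python computes it through float division, exact at these sizes; n = 0 raises
-- ZeroDivisionError in Python and is excluded by Pre_)
def pvRowsA (msgT : List Char) (n : Nat) : List (List Char) :=
  (PySem.List.pyRange 0 (((msgT.length + n - 1) / n : Nat) : Int) 1).foldl
    (fun acc i => acc ++ [PySem.List.slice msgT (some (i * (n : Int))) (some ((i + 1) * (n : Int)))]) []

-- '["".join(i) for i in zip_longest(*l, fillvalue="")]': zip_longest yields as many tuples as the
-- longest row is long; joining tuple j keeps exactly the j-th character of each row that is long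
-- enough (the fillvalue "" contributes nothing) — exact
def pvColsA (rows : List (List Char)) : List (List Char) :=
  (List.range ((rows.map List.length).foldl max 0)).map
    (fun j => rows.filterMap (fun r => r[j]?))

-- 'for i in range(n): dict[keyword[i]] = l[i]'; l[i] raises IndexError when i ≥ len(l) — those
-- inputs are excluded by Pre_
def pvDictA (cols : List (List Char)) (kw : List Char) (n : Nat) : PySem.Dict Char (List Char) :=
  (PySem.List.pyRange 0 (n : Int) 1).foldl (fun d i =>
    d.insert (PySem.List.pyGetD kw i ' ') (PySem.List.pyGetD cols i [])) PySem.Dict.empty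

-- sorted(dict.items(), key=lambda x: x[0]) then '"".join([i[1] for i in l])' (join = concatenation)
def encode (message : String) (secret_alphabet : String) (keyword : String) : String :=
  String.ofList
    (((PySem.List.sorted
        (pvDictA (pvColsA (pvRowsA (pvMsgTA message) keyword.toList.length))
          keyword.toList keyword.toList.length).items
        (fun x => x.1) false).map (fun x => x.2)).flatten)

-- ===== PORT B =====
def pvItemB : List Char := "ADFGVX".toList
def pvFlat : List Char := "dhxmu4p3j6aoibzv9w1n70qkfslyc8tr5e2g".toList

-- {c: item[i//6] + item[i%6] for i, c in enumerate(flat)}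
def pvTableB : PySem.Dict Char (List Char) :=
  (PySem.List.enumerate pvFlat 0).foldl (fun d p =>
    d.insert p.2 [PySem.List.pyGetD pvItemB (PySem.Int.floordiv p.1 6) ' ',
                  PySem.List.pyGetD pvItemB (PySem.Int.mod p.1 6) ' ']) PySem.Dict.empty

-- '"".join(table[c] for c in message.lower() if c.isalpha() or c.isdigit())'
-- (table[c] cannot raise KeyError: kept characters are ASCII [a-z0-9], all table keys)
def pvMsgTB (message : String) : List Char :=
  (((PySem.Chars.lower message.toList).filter
      (fun c => PySem.Chars.isalpha c || PySem.Chars.isdigit c)).map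
    (fun c => pvTableB.getD c [])).flatten

-- '{keyword[j]: msg[j::n] for j in range(n)}'; the body only runs for 0 ≤ j < n, so the slice
-- step n is nonzero and slice? is some
def pvDictB (msgT : List Char) (kw : List Char) (n : Nat) : PySem.Dict Char (List Char) :=
  (PySem.List.pyRange 0 (n : Int) 1).foldl (fun d j =>
    d.insert (PySem.List.pyGetD kw j ' ')
      ((PySem.List.slice? msgT (some j) none (n : Int)).getD [])) PySem.Dict.empty

-- '"".join(cols[k] for k in sorted(cols))' (sorted over a dict iterates its keys)
def encode_alt (message : String) (secret_alphabet : String) (keyword : String) : String :=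
  String.ofList
    (((PySem.List.sorted
        (pvDictB (pvMsgTB message) keyword.toList keyword.toList.length).keys
        (fun k => k) false).map
      (fun k => (pvDictB (pvMsgTB message) keyword.toList keyword.toList.length).getD k [])).flatten)

-- ===== PRECONDITION & SPEC =====
-- A raises ZeroDivisionError on an empty keyword, and IndexError (at 'l[i]') whenever the keyword
-- is longer than the translated message (twice the number of kept alphanumeric characters);
-- Pre_ excludes exactly those raising inputs.
def Pre_encode (message : String) (secret_alphabet : String) (keyword : String) : Prop :=
  keyword ≠ "" ∧
  keyword.toList.length ≤
    2 * ((PySem.Chars.lower message.toList).filter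
          (fun c => PySem.Chars.isalpha c || PySem.Chars.isdigit c)).length
instance (message : String) (secret_alphabet : String) (keyword : String) : Decidable (Pre_encode message secret_alphabet keyword) := by unfold Pre_encode; infer_instance

def pvWitness_encode : String × String × String := ("Attack at 12:00!", "secret", "key")

def Spec_encode (message : String) (secret_alphabet : String) (keyword : String) (out : String) : Prop := out = encode_alt message secret_alphabet keyword
instance (message : String) (secret_alphabet : String) (keyword : String) (out : String) : Decidable (Spec_encode message secret_alphabet keyword out) := by unfold Spec_encode; infer_instance

-- ===== CLAIM (what is proved, stated in full; the proofs are below) =====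
def Claim_equal_encode : Prop := ∀ (message : String) (secret_alphabet : String) (keyword : String), Dom_encode message secret_alphabet keyword → Pre_encode message secret_alphabet keyword → Spec_encode message secret_alphabet keyword (encode message secret_alphabet keyword)


-- ===== LEMMAS AND PROOFS =====

-- the two translation tables are the same finite dictionary
set_option maxRecDepth 8000 in
theorem pvTable_eq : pvTableA = pvTableB := by decide

theorem pvMsgT_eq (message : String) : pvMsgTA message = pvMsgTB message := by
  unfold pvMsgTA pvMsgTB; rw [pvTable_eq]

-- a lowered character is never an upper-case letter
theorem pvLowerChar_not_upper (c : Char) :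
    PySem.Chars.isupper (PySem.Chars.lowerChar c) = false := by
  unfold PySem.Chars.lowerChar
  split_ifs with h
  · unfold PySem.Chars.isupper at h ⊢
    simp only [Bool.and_eq_true, decide_eq_true_eq, Char.le_def, UInt32.le_iff_toNat_le] at h
    have e3 : c.val.toNat = c.toNat := rfl
    have h65 : 65 ≤ c.toNat := by
      have := h.1; simp only [show 'A'.val.toNat = 65 from rfl] at this; omega
    have h90 : c.toNat ≤ 90 := by
      have := h.2; simp only [show 'Z'.val.toNat = 90 from rfl] at this; omega
    have hv : (c.toNat + 32).isValidChar := by left; omega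
    simp only [Bool.and_eq_false_iff, decide_eq_false_iff_not, Char.le_def,
      UInt32.le_iff_toNat_le]
    have hofq : (Char.ofNat (c.toNat + 32)).val.toNat = c.toNat + 32 := by
      rw [show (Char.ofNat (c.toNat + 32)).val.toNat = (Char.ofNat (c.toNat + 32)).toNat from rfl,
        Char.toNat_ofNat, if_pos hv]
    simp only [show 'A'.val.toNat = 65 from rfl, show 'Z'.val.toNat = 90 from rfl]
    omega
  · simpa [PySem.Chars.isupper] using h

-- every character kept by the filter is an ASCII lower-case letter or digit
theorem pvKept_range (c : Char)
    (h : (PySem.Chars.isalpha (PySem.Chars.lowerChar c) ||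
          PySem.Chars.isdigit (PySem.Chars.lowerChar c)) = true) :
    (97 ≤ (PySem.Chars.lowerChar c).toNat ∧ (PySem.Chars.lowerChar c).toNat ≤ 122) ∨
    (48 ≤ (PySem.Chars.lowerChar c).toNat ∧ (PySem.Chars.lowerChar c).toNat ≤ 57) := by
  rcases Bool.or_eq_true_iff.mp h with ha | hd
  · unfold PySem.Chars.isalpha at ha
    rw [pvLowerChar_not_upper, Bool.false_or] at ha
    unfold PySem.Chars.islower at ha
    simp only [Bool.and_eq_true, decide_eq_true_eq, Char.le_def] at ha
    exact Or.inl ha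
  · unfold PySem.Chars.isdigit at hd
    simp only [Bool.and_eq_true, decide_eq_true_eq, Char.le_def] at hd
    exact Or.inr hd

-- every table entry looked up by the translation has length 2
set_option maxRecDepth 100000 in
theorem pvTableLen_aux : ∀ t ∈ List.range 123, (97 ≤ t ∧ t ≤ 122 ∨ 48 ≤ t ∧ t ≤ 57) →
    (pvTableA.getD (Char.ofNat t) []).length = 2 := by decide

theorem pvTableLen (c : Char)
    (h : (97 ≤ c.toNat ∧ c.toNat ≤ 122) ∨ (48 ≤ c.toNat ∧ c.toNat ≤ 57)) :
    (pvTableA.getD c []).length = 2 := by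
  have := pvTableLen_aux c.toNat (List.mem_range.mpr (by omega)) h
  rwa [Char.ofNat_toNat] at this

-- the translated message is twice the filtered message
set_option maxRecDepth 10000 in
theorem pvMsgT_len (message : String) :
    (pvMsgTA message).length =
    2 * ((PySem.Chars.lower message.toList).filter
          (fun c => PySem.Chars.isalpha c || PySem.Chars.isdigit c)).length := by
  unfold pvMsgTA
  rw [List.length_flatten, List.map_map]
  have hmem : ∀ c ∈ (PySem.Chars.lower message.toList).filter
      (fun c => PySem.Chars.isalpha c || PySem.Chars.isdigit c),
      (List.length ∘ fun c => pvTableA.getD c []) c = (fun _ => 2) c := by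
    intro c hc
    obtain ⟨hcl, hcp⟩ := List.mem_filter.mp hc
    obtain ⟨c0, _, rfl⟩ := List.mem_map.mp hcl
    exact pvTableLen _ (pvKept_range c0 hcp)
  rw [List.map_congr_left hmem, List.map_const', List.sum_replicate, smul_eq_mul,
    Nat.mul_comm]

-- m = ceil(a/n) really covers a: a ≤ n * ceil(a/n)
theorem pvCeil_le (a n : Nat) (hn : 1 ≤ n) : a ≤ n * ((a + n - 1) / n) := by
  have h := Nat.div_add_mod (a + n - 1) n
  have h2 : (a + n - 1) % n < n := Nat.mod_lt _ (by omega)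
  generalize hw : n * ((a + n - 1) / n) = w at h ⊢
  omega

-- past the last full stride the message is exhausted
theorem pvHnone (len n j i : Nat) (hn : 1 ≤ n) (hj : j < len)
    (hi : (len - j + n - 1) / n ≤ i) : len ≤ j + n * i := by
  have h1 : len - j ≤ n * ((len - j + n - 1) / n) := pvCeil_le _ _ hn
  have h2 : n * ((len - j + n - 1) / n) ≤ n * i := Nat.mul_le_mul_left _ hi
  have h3 : len - j ≤ n * i := le_trans h1 h2
  calc len = j + (len - j) := by omega
    _ ≤ j + n * i := Nat.add_le_add_left h3 j

-- a filterMap over a longer range that is none beyond K collapses to range K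
theorem pvStab {α : Type} (f : Nat → Option α) (K M : Nat) (hKM : K ≤ M)
    (hnone : ∀ i, K ≤ i → f i = none) :
    (List.range M).filterMap f = (List.range K).filterMap f := by
  conv_lhs => rw [show M = K + (M - K) by omega]
  rw [List.range_add, List.filterMap_append, List.filterMap_map]
  have hnil : List.filterMap (f ∘ fun x => K + x) (List.range (M - K)) = [] := by
    rw [List.filterMap_eq_nil_iff]
    intro a _
    exact hnone _ (Nat.le_add_right K a)
  rw [hnil, List.append_nil]

-- B's strided slice, computed
theorem pvSliceB (msgT : List Char) (n j : Nat) (hn : 1 ≤ n) (hj : j < n)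
    (hlen : n ≤ msgT.length) :
    (PySem.List.slice? msgT (some (j : Int)) none (n : Int)).getD [] =
    (List.range ((msgT.length - j + n - 1) / n)).filterMap (fun k => msgT[j + n * k]?) := by
  unfold PySem.List.slice? PySem.List.sliceIndices
  simp only [show ¬((n : Int) = 0) by omega, if_false, show ¬((n : Int) < 0) by omega,
    show (0 : Int) < n by omega, if_pos,
    show ¬((j : Int) < 0) by omega, show min (j : Int) (msgT.length : Int) = (j : Int) by omega,
    show ((j : Int) < msgT.length) = True by simp; omega, Option.getD_some]
  have hc : (((msgT.length : Int) - (j : Int) + (n : Int) - 1) / (n : Int)).toNat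
      = (msgT.length - j + n - 1) / n := by
    rw [show ((msgT.length : Int) - (j : Int) + (n : Int) - 1)
          = ((msgT.length - j + n - 1 : Nat) : Int) by omega]
    rw [← Int.natCast_div, Int.toNat_natCast]
  rw [hc]
  apply List.filterMap_congr
  intro k hk
  congr 1

-- A's row-building loop produces the chunks of size n
theorem pvRows_eq (msgT : List Char) (n : Nat) :
    pvRowsA msgT n
    = (List.range ((msgT.length + n - 1) / n)).map (fun i => (msgT.drop (i * n)).take n) := by
  unfold pvRowsA
  rw [PySem.List.foldl_append_singleton_eq_map, List.nil_append,
      PySem.List.pyRange_zero_natCast, List.map_map]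
  apply List.map_congr_left
  intro i hi
  show PySem.List.slice msgT (some ((i : Int) * n)) (some (((i : Int) + 1) * n)) = _
  rw [show ((i : Int) * n) = ((i * n : Nat) : Int) by push_cast; ring,
      show (((i : Int) + 1) * n) = ((i * n + n : Nat) : Int) by push_cast; ring,
      PySem.List.slice_natCast]
  congr 1
  omega

-- zip_longest runs to the longest row, which is the first (full) one: n tuples
theorem pvMaxlen (msgT : List Char) (n : Nat) (hn : 1 ≤ n) (hlen : n ≤ msgT.length) :
    ((pvRowsA msgT n).map List.length).foldl max 0 = n := by
  rw [pvRows_eq, List.map_map]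
  set L := (List.range ((msgT.length + n - 1) / n)).map
    (List.length ∘ fun i => (msgT.drop (i * n)).take n) with hL
  have hm1 : 0 < (msgT.length + n - 1) / n := Nat.div_pos (by omega) (by omega)
  have hmem : n ∈ L := by
    rw [hL]
    refine List.mem_map.mpr ⟨0, List.mem_range.mpr hm1, ?_⟩
    simp only [Function.comp, Nat.zero_mul, List.drop_zero, List.length_take]
    omega
  have hub : ∀ y ∈ L, y ≤ n := by
    intro y hy
    rw [hL] at hy
    obtain ⟨i, _, rfl⟩ := List.mem_map.mp hy
    simp [Function.comp, List.length_take]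
  have h1 : n ≤ L.foldl max 0 := (PySem.List.le_foldl_max L 0).2 n hmem
  rcases PySem.List.foldl_max_mem L 0 with h | h
  · rw [h] at h1; omega
  · exact le_antisymm (hub _ h) h1

-- column j of the transposed rows is exactly B's strided slice
theorem pvCol_eq (msgT : List Char) (n j : Nat) (hn : 1 ≤ n) (hj : j < n)
    (hlen : n ≤ msgT.length) :
    (pvRowsA msgT n).filterMap (fun r => r[j]?)
    = (PySem.List.slice? msgT (some (j : Int)) none (n : Int)).getD [] := by
  rw [pvSliceB msgT n j hn hj hlen, pvRows_eq, List.filterMap_map]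
  have hfun : ∀ i ∈ List.range ((msgT.length + n - 1) / n),
      ((fun r => r[j]?) ∘ fun i => (msgT.drop (i * n)).take n) i = msgT[j + n * i]? := by
    intro i _
    simp only [Function.comp, List.getElem?_take, List.getElem?_drop, if_pos hj]
    congr 1
    ring
  rw [List.filterMap_congr hfun]
  exact pvStab _ _ _ (Nat.div_le_div_right (by omega))
    (fun i hi => List.getElem?_eq_none (pvHnone msgT.length n j i hn (by omega) hi))

-- the two dictionaries are equal entry by entry
theorem pvDict_eq (msgT kw : List Char) (n : Nat) (hn : 1 ≤ n) (hlen : n ≤ msgT.length) :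
    pvDictA (pvColsA (pvRowsA msgT n)) kw n = pvDictB msgT kw n := by
  unfold pvDictA pvDictB
  apply PySem.List.foldl_congr_mem
  intro acc i hi
  rw [PySem.List.mem_pyRange_one] at hi
  obtain ⟨h0, hiN⟩ := hi
  obtain ⟨j, rfl⟩ : ∃ j : Nat, i = (j : Int) := ⟨i.toNat, (Int.toNat_of_nonneg h0).symm⟩
  have hj : j < n := by exact_mod_cast hiN
  congr 1
  rw [PySem.List.pyGetD_natCast]
  have hcols : pvColsA (pvRowsA msgT n)
      = (List.range n).map (fun j => (pvRowsA msgT n).filterMap (fun r => r[j]?)) := by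
    unfold pvColsA
    rw [pvMaxlen msgT n hn hlen]
  rw [hcols, PySem.List.getD_map_range _ _ _ _ hj]
  exact pvCol_eq msgT n j hn hj hlen

-- reading the sorted items' values = looking the sorted keys up, for nodup keys
theorem pvOut_eq (d : PySem.Dict Char (List Char)) (hnd : d.keys.Nodup) :
    (PySem.List.sorted d.items (fun x => x.1) false).map (fun x => x.2)
    = (PySem.List.sorted d.keys (fun k => k) false).map (fun k => d.getD k []) := by
  have hperm : ((PySem.List.sorted d.items (fun x => x.1) false).map (fun x => x.1)).Perm d.keys := by
    exact (PySem.List.sorted_perm d.items (fun x => x.1) false).map _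
  have hkeys : PySem.List.sorted d.keys (fun k => k) false
      = (PySem.List.sorted d.items (fun x => x.1) false).map (fun x => x.1) := by
    apply PySem.List.sorted_eq_of_perm_of_pairwise_lt _ _ _ hperm
    have hnodup : ((PySem.List.sorted d.items (fun x => x.1) false).map (fun x => x.1)).Nodup :=
      hperm.nodup_iff.mpr hnd
    have hle := PySem.List.sorted_pairwise d.items (fun x => x.1)
    rw [List.pairwise_map]
    rw [List.Nodup, List.pairwise_map] at hnodup
    exact (hle.and hnodup).imp (fun h => lt_of_le_of_ne h.1 h.2)
  rw [hkeys, List.map_map]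
  apply List.map_congr_left
  intro p hp
  have hpmem : p ∈ d.items := (PySem.List.sorted_perm d.items (fun x => x.1) false).subset hp
  exact (PySem.Dict.getD_of_mem_items d hpmem hnd []).symm

-- keys of the built dictionary are nodup
theorem pvDictB_nodup (msgT kw : List Char) (n : Nat) : (pvDictB msgT kw n).keys.Nodup := by
  unfold pvDictB
  exact PySem.Dict.nodup_keys_foldl_insert_key _ _ _ _ PySem.Dict.nodup_keys_empty

-- ===== VERDICT (by name: the statement is the Claim_ definition above) =====
theorem encode_spec : Claim_equal_encode := by
  intro message secret_alphabet keyword _ hpre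
  obtain ⟨hne, hlen2⟩ := hpre
  have hn : 1 ≤ keyword.toList.length := by
    rcases h : keyword.toList with _ | ⟨c, t⟩
    · exact absurd (String.toList_eq_nil_iff.mp h) hne
    · simp
  have hmlen : keyword.toList.length ≤ (pvMsgTA message).length := by
    rw [pvMsgT_len]; exact hlen2
  have key : pvDictA (pvColsA (pvRowsA (pvMsgTA message) keyword.toList.length))
      keyword.toList keyword.toList.length
      = pvDictB (pvMsgTB message) keyword.toList keyword.toList.length := by
    rw [← pvMsgT_eq]
    exact pvDict_eq _ _ _ hn hmlen
  unfold Spec_encode encode encode_alt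
  rw [key, pvOut_eq _ (by rw [← pvMsgT_eq]; exact pvDictB_nodup _ _ _)]
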